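-- pv_equiv track=rewrite | github.com/bportil1/Algorithm_Implementations | counting_sort_and_parr_arrs_med.py | parallel_arrays_min_queries
-- ===== SOURCE A (Python) =====
-- import math
--
-- def parallel_arrays_min_queries(n: int, arr1: int, arr2: int, arr1_ind: int, arr2_ind:  int, query_count) -> int:
--     #Base Case for recursive calls
--     if n == 1:
--         return min(arr1[arr1_ind], arr2[arr2_ind]), query_count
--
--     #Update middle pointer for arrays
--     k = math.ceil((n/2))
--
--     #Query both databases and update pointers for recursive search
--     if arr1[arr1_ind+k] < arr2[arr2_ind+k]:
--         return parallel_arrays_min_queries(k, arr1, arr2, arr1_ind + (n//2), arr2_ind,  query_count + 2)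
--     else:
--         return parallel_arrays_min_queries(k, arr1, arr2, arr1_ind, arr2_ind + (n//2), query_count + 2)
-- ===== SOURCE B (Python) =====
-- def parallel_arrays_min_queries(n, arr1, arr2, arr1_ind, arr2_ind, query_count):
--     # Precompute the halving schedule, then fold the pointer updates over it;
--     # the query count is n-dependent only, so it is computed arithmetically at the end.
--     sizes = []
--     m = n
--     while m != 1:
--         sizes.append(m)
--         m = (m + 1) // 2          # == math.ceil(m/2) for integers
--     i1, i2 = arr1_ind, arr2_ind
--     for m in sizes:
--         k = (m + 1) // 2
--         if arr1[i1 + k] < arr2[i2 + k]: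
--             i1 += m // 2
--         else:
--             i2 += m // 2
--     return min(arr1[i1], arr2[i2]), query_count + 2 * len(sizes)
-- ===== Notes on version B (the rewrite author's own statement) =====
-- stated objective: alternative
-- what changed: Replaces A's direct recursion threading the query counter through every call by a two-phase iteration: first precompute the halving schedule of sizes, then fold the pointer updates over that list and compute the query count arithmetically as 2*len(schedule) at the end.
-- outside the precondition, e.g. on parallel_arrays_min_queries(4, [0, 9, 9], [5, 6, 7, 8], 0, 0, 0): A returns (0, 4), B returns (0, 4); on parallel_arrays_min_queries(2, [1, 2, 3], [4, 5, 6], -4, 0, 0): A returns (1, 2), B returns (1, 2)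
import Mathlib
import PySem

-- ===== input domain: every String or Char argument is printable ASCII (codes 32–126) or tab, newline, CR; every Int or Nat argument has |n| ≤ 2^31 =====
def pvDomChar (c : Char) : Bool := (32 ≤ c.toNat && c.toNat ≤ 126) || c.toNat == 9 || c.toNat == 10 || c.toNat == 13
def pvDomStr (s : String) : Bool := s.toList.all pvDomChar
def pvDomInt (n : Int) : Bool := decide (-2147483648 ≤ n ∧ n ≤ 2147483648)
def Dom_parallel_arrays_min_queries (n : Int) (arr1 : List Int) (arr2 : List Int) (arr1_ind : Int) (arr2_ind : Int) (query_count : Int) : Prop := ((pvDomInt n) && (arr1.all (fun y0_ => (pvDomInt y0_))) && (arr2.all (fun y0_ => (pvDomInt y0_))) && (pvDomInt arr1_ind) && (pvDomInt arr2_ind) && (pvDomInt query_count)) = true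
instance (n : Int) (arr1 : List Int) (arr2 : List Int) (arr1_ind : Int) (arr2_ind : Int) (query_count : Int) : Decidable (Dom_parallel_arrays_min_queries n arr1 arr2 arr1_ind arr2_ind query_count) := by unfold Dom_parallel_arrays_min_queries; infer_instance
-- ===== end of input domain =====

-- B replaces A's counter-threading recursion by a precomputed halving schedule plus a fold,
-- with the query count derived as 2 * schedule length at the end (alternative decomposition, same cost).


-- ===== PORT A =====
-- Literal port of A's recursion. Indexing is PySem.List.pyGet? (Python semantics, incl. negative
-- indices) with .getD 0 only where Python would raise IndexError — outside Pre_. The branch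
-- 'n < 1' is a totality guard: the Python recursion diverges there (outside Pre_).
-- math.ceil(n/2) is ported as -((-n) // 2), exact for |n| ≤ 2^31 (float division is exact there).
def parallel_arrays_min_queries (n : Int) (arr1 : List Int) (arr2 : List Int) (arr1_ind : Int) (arr2_ind : Int) (query_count : Int) : Int × Int :=
  if _h1 : n = 1 then
    (min ((PySem.List.pyGet? arr1 arr1_ind).getD 0) ((PySem.List.pyGet? arr2 arr2_ind).getD 0), query_count)
  else if _h2 : n < 1 then (0, 0)  -- totality guard: Python diverges for n < 1
  else
    let k := -(PySem.Int.floordiv (-n) 2)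
    if (PySem.List.pyGet? arr1 (arr1_ind + k)).getD 0 < (PySem.List.pyGet? arr2 (arr2_ind + k)).getD 0 then
      parallel_arrays_min_queries k arr1 arr2 (arr1_ind + PySem.Int.floordiv n 2) arr2_ind (query_count + 2)
    else
      parallel_arrays_min_queries k arr1 arr2 arr1_ind (arr2_ind + PySem.Int.floordiv n 2) (query_count + 2)
termination_by n.toNat
decreasing_by
  all_goals
    simp only [PySem.Int.floordiv_eq_ediv_of_pos (by norm_num : (0:Int) < 2)]
    omega

-- ===== PORT B =====
-- the while-loop building `sizes` in Source B (guard for m < 1: the Python loop diverges there)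
def pvSchedule (m : Int) : List Int :=
  if _h1 : m = 1 then []
  else if _h2 : m < 1 then []  -- totality guard: Python diverges for m < 1
  else m :: pvSchedule (PySem.Int.floordiv (m + 1) 2)
termination_by m.toNat
decreasing_by
  simp only [PySem.Int.floordiv_eq_ediv_of_pos (by norm_num : (0:Int) < 2)]
  omega

-- the body of Source B's `for m in sizes` loop
def pvStep (arr1 arr2 : List Int) (p : Int × Int) (m : Int) : Int × Int :=
  let k := PySem.Int.floordiv (m + 1) 2
  if (PySem.List.pyGet? arr1 (p.1 + k)).getD 0 < (PySem.List.pyGet? arr2 (p.2 + k)).getD 0 then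
    (p.1 + PySem.Int.floordiv m 2, p.2)
  else
    (p.1, p.2 + PySem.Int.floordiv m 2)

def parallel_arrays_min_queries_alt (n : Int) (arr1 : List Int) (arr2 : List Int) (arr1_ind : Int) (arr2_ind : Int) (query_count : Int) : Int × Int :=
  let sizes := pvSchedule n
  let p := sizes.foldl (pvStep arr1 arr2) (arr1_ind, arr2_ind)
  (min ((PySem.List.pyGet? arr1 p.1).getD 0) ((PySem.List.pyGet? arr2 p.2).getD 0),
   query_count + 2 * (sizes.length : Int))

-- ===== PRECONDITION & SPEC =====
-- Pre_ excludes n < 1 (the Python recursion diverges) and windows [ind, ind+n) that are not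
-- entirely inside the Python-valid index range [-len, len) of their array — there A raises
-- IndexError on part of the data, and for the remaining data (a search path that happens not to
-- overrun the short side) whether A raises is data-dependent, so they are excluded wholesale.
def Pre_parallel_arrays_min_queries (n : Int) (arr1 : List Int) (arr2 : List Int) (arr1_ind : Int) (arr2_ind : Int) (query_count : Int) : Prop :=
  1 ≤ n ∧ -(arr1.length : Int) ≤ arr1_ind ∧ arr1_ind + n ≤ arr1.length ∧
    -(arr2.length : Int) ≤ arr2_ind ∧ arr2_ind + n ≤ arr2.length
instance (n : Int) (arr1 : List Int) (arr2 : List Int) (arr1_ind : Int) (arr2_ind : Int) (query_count : Int) : Decidable (Pre_parallel_arrays_min_queries n arr1 arr2 arr1_ind arr2_ind query_count) := by unfold Pre_parallel_arrays_min_queries; infer_instance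

def pvWitness_parallel_arrays_min_queries : Int × List Int × List Int × Int × Int × Int :=
  (4, [3, 1, 4, 1], [5, 9, 2, 6], 0, 0, 0)

def Spec_parallel_arrays_min_queries (n : Int) (arr1 : List Int) (arr2 : List Int) (arr1_ind : Int) (arr2_ind : Int) (query_count : Int) (out : Int × Int) : Prop := out = parallel_arrays_min_queries_alt n arr1 arr2 arr1_ind arr2_ind query_count
instance (n : Int) (arr1 : List Int) (arr2 : List Int) (arr1_ind : Int) (arr2_ind : Int) (query_count : Int) (out : Int × Int) : Decidable (Spec_parallel_arrays_min_queries n arr1 arr2 arr1_ind arr2_ind query_count out) := by unfold Spec_parallel_arrays_min_queries; infer_instance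

-- ===== CLAIM (what is proved, stated in full; the proofs are below) =====
def Claim_equal_parallel_arrays_min_queries : Prop := ∀ (n : Int) (arr1 : List Int) (arr2 : List Int) (arr1_ind : Int) (arr2_ind : Int) (query_count : Int), Dom_parallel_arrays_min_queries n arr1 arr2 arr1_ind arr2_ind query_count → Pre_parallel_arrays_min_queries n arr1 arr2 arr1_ind arr2_ind query_count → Spec_parallel_arrays_min_queries n arr1 arr2 arr1_ind arr2_ind query_count (parallel_arrays_min_queries n arr1 arr2 arr1_ind arr2_ind query_count)

-- ===== LEMMAS AND PROOFS =====

lemma pvStep_eq (arr1 arr2 : List Int) (i1 i2 m : Int) :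
    pvStep arr1 arr2 (i1, i2) m =
      if (PySem.List.pyGet? arr1 (i1 + PySem.Int.floordiv (m + 1) 2)).getD 0 <
          (PySem.List.pyGet? arr2 (i2 + PySem.Int.floordiv (m + 1) 2)).getD 0 then
        (i1 + PySem.Int.floordiv m 2, i2)
      else
        (i1, i2 + PySem.Int.floordiv m 2) := rfl

-- integer ceiling: -((-n) // 2) = (n + 1) // 2
lemma pv_ceil_eq (n : Int) : -(PySem.Int.floordiv (-n) 2) = PySem.Int.floordiv (n + 1) 2 := by
  simp only [PySem.Int.floordiv_eq_ediv_of_pos (by norm_num : (0:Int) < 2)]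
  omega

lemma pvSchedule_one : pvSchedule 1 = [] := by
  rw [pvSchedule]; simp

lemma pvSchedule_cons {m : Int} (h : 2 ≤ m) :
    pvSchedule m = m :: pvSchedule (PySem.Int.floordiv (m + 1) 2) := by
  rw [pvSchedule]
  simp [show ¬ m = 1 by omega, show ¬ m < 1 by omega]

lemma pv_alt_eq (n : Int) (arr1 arr2 : List Int) (i1 i2 qc : Int) :
    parallel_arrays_min_queries_alt n arr1 arr2 i1 i2 qc =
      (let p := (pvSchedule n).foldl (pvStep arr1 arr2) (i1, i2)
       (min ((PySem.List.pyGet? arr1 p.1).getD 0) ((PySem.List.pyGet? arr2 p.2).getD 0),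
        qc + 2 * ((pvSchedule n).length : Int))) := rfl

lemma pv_main (arr1 arr2 : List Int) :
    ∀ (fuel : Nat) (n : Int), n.toNat ≤ fuel → 1 ≤ n → ∀ (i1 i2 qc : Int),
      parallel_arrays_min_queries n arr1 arr2 i1 i2 qc =
        parallel_arrays_min_queries_alt n arr1 arr2 i1 i2 qc := by
  intro fuel
  induction fuel with
  | zero => intro n hle h1; omega
  | succ f ih =>
    intro n hle h1 i1 i2 qc
    by_cases hn1 : n = 1
    · subst hn1
      rw [parallel_arrays_min_queries, pv_alt_eq]
      simp [pvSchedule_one]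
    · have h2 : 2 ≤ n := by omega
      have hk : -(PySem.Int.floordiv (-n) 2) = PySem.Int.floordiv (n + 1) 2 := pv_ceil_eq n
      have hkb : 1 ≤ PySem.Int.floordiv (n + 1) 2 ∧ PySem.Int.floordiv (n + 1) 2 < n := by
        simp only [PySem.Int.floordiv_eq_ediv_of_pos (by norm_num : (0:Int) < 2)]
        omega
      rw [parallel_arrays_min_queries]
      simp only [hn1, dite_false, show ¬ n < 1 by omega, dite_false, hk]
      have hb : ∀ i1' i2' qc',
          parallel_arrays_min_queries (PySem.Int.floordiv (n + 1) 2) arr1 arr2 i1' i2' qc' =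
            parallel_arrays_min_queries_alt (PySem.Int.floordiv (n + 1) 2) arr1 arr2 i1' i2' qc' := by
        intro i1' i2' qc'
        exact ih _ (by omega) (by omega) _ _ _
      rw [pv_alt_eq n, pvSchedule_cons h2]
      simp only [List.foldl_cons, List.length_cons]
      rw [pvStep_eq]
      split_ifs with hcmp
      all_goals
        rw [hb, pv_alt_eq]
        refine Prod.ext rfl ?_
        push_cast
        ring

-- ===== VERDICT (by name: the statement is the Claim_ definition above) =====
theorem parallel_arrays_min_queries_spec : Claim_equal_parallel_arrays_min_queries := by
  intro n arr1 arr2 i1 i2 qc _hdom hpre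
  exact pv_main arr1 arr2 n.toNat n le_rfl hpre.1 i1 i2 qc
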